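-- pv_equiv track=rewrite | github.com/avdeloya13/Complejidad-Computacional | 3sat.py | para_or
-- ===== SOURCE A (Python) =====
-- def para_or(cadena):
-- #FASE VERIFICADORA, se encarga de los or de la formula.
-- #En la tabla de verdad de or, solo tenemos valores false cuando todas nuestras
-- #variables son false. En el resto de los casos es true.
--
--     nueva = ''
--
--     #Para eliminar espacios, simbolos *
--     for i in cadena:
--
--         if i == '*':
--             nueva += i
--
--         if i == '(':
--             nueva += ' ('
--
--         elif i.isdigit():
--             nueva += i
--
--         elif i == ')':
--             nueva += ') '
--
--     #replace() lo que hace es que recorrer la cadena nueva y hace la sustitucion conforme avanza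
--     nueva = nueva.replace("(000)", "0")
--     nueva = nueva.replace("(001)", "1")
--     nueva = nueva.replace("(010)", "1")
--     nueva = nueva.replace("(011)", "1")
--     nueva = nueva.replace("(101)", "1")
--     nueva = nueva.replace("(100)", "1")
--     nueva = nueva.replace("(110)", "1")
--     nueva = nueva.replace("(111)", "1")
--
--     return nueva
-- ===== SOURCE B (Python) =====
-- def _keep(c):
--     if c == '(':
--         return ' ('
--     if c == ')':
--         return ') '
--     if c == '*' or c.isdigit():
--         return c
--     return ''
--
--
-- def para_or(cadena):
--     # cleaning pass: one table-like helper instead of A's if/elif chain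
--     nueva = ''.join(_keep(c) for c in cadena)
--     # single left-to-right scan replacing '(bbb)' groups, instead of eight .replace passes
--     out = []
--     i = 0
--     n = len(nueva)
--     while i < n:
--         if (nueva[i] == '(' and i + 4 < n
--                 and nueva[i + 1] in '01' and nueva[i + 2] in '01'
--                 and nueva[i + 3] in '01' and nueva[i + 4] == ')'):
--             out.append('0' if nueva[i + 1:i + 4] == '000' else '1')
--             i += 5
--         else:
--             out.append(nueva[i])
--             i += 1
--     return ''.join(out)
-- ===== Notes on version B (the rewrite author's own statement) =====
-- stated objective: alternative
-- what changed: The eight sequential .replace passes over the cleaned string are replaced by a single left-to-right index scan that recognises '(' + three 0/1 digits + ')' groups in one pass, and the cleaning if/elif chain becomes a per-character helper joined once.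
import Mathlib
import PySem

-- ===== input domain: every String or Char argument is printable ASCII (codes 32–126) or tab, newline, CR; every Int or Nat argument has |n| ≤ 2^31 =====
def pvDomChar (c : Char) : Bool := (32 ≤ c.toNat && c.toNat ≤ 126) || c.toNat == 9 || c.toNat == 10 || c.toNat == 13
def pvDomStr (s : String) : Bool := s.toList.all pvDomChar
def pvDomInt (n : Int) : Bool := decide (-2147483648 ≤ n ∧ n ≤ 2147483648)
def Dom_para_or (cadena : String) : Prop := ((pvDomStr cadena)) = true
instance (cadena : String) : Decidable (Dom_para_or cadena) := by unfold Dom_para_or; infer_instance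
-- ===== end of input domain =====

-- B replaces A's eight sequential .replace passes by one left-to-right scan; same return value.

-- ===== PORT A =====
def para_or (cadena : String) : String :=
  let nueva : List Char := cadena.toList.foldl (fun nueva i =>
    let nueva := if i = '*' then nueva ++ [i] else nueva
    if i = '(' then nueva ++ [' ', '(']
    else if PySem.Chars.isdigit i then nueva ++ [i]
    else if i = ')' then nueva ++ [')', ' ']
    else nueva) []
  let nueva := PySem.Chars.replace nueva ['(', '0', '0', '0', ')'] ['0']
  let nueva := PySem.Chars.replace nueva ['(', '0', '0', '1', ')'] ['1']
  let nueva := PySem.Chars.replace nueva ['(', '0', '1', '0', ')'] ['1']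
  let nueva := PySem.Chars.replace nueva ['(', '0', '1', '1', ')'] ['1']
  let nueva := PySem.Chars.replace nueva ['(', '1', '0', '1', ')'] ['1']
  let nueva := PySem.Chars.replace nueva ['(', '1', '0', '0', ')'] ['1']
  let nueva := PySem.Chars.replace nueva ['(', '1', '1', '0', ')'] ['1']
  let nueva := PySem.Chars.replace nueva ['(', '1', '1', '1', ')'] ['1']
  String.ofList nueva

-- ===== PORT B =====
-- _keep from Source B
def pvKeep (c : Char) : List Char :=
  if c = '(' then [' ', '(']
  else if c = ')' then [')', ' ']
  else if c = '*' ∨ PySem.Chars.isdigit c then [c]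
  else []

-- the while-loop scanner from Source B
def pvScan : List Char → List Char
  | '(' :: a :: b :: d :: e :: rest' =>
    if (a = '0' ∨ a = '1') ∧ (b = '0' ∨ b = '1') ∧ (d = '0' ∨ d = '1') ∧ e = ')' then
      (if a = '0' ∧ b = '0' ∧ d = '0' then '0' else '1') :: pvScan rest'
    else '(' :: pvScan (a :: b :: d :: e :: rest')
  | c :: rest => c :: pvScan rest
  | [] => []
termination_by l => l.length
decreasing_by all_goals (simp only [List.length_cons]; omega)

def para_or_alt (cadena : String) : String :=
  let nueva : List Char := cadena.toList.flatMap pvKeep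
  String.ofList (pvScan nueva)

-- ===== PRECONDITION & SPEC =====
def Spec_para_or (cadena : String) (out : String) : Prop := out = para_or_alt cadena
instance (cadena : String) (out : String) : Decidable (Spec_para_or cadena out) := by unfold Spec_para_or; infer_instance

-- ===== CLAIM (what is proved, stated in full; the proofs are below) =====
def Claim_equal_para_or : Prop := ∀ (cadena : String), Dom_para_or cadena → Spec_para_or cadena (para_or cadena)

-- ===== LEMMAS AND PROOFS =====

-- token view of the cleaned string: op = " (", cl = ") ", star = "*", dig c = "c",
-- val c = " c " (the residue of replacing "(xyz)" inside " (xyz) " by "c")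
inductive PvTok : Type
  | op : PvTok
  | cl : PvTok
  | star : PvTok
  | dig : Char → PvTok
  | val : Char → PvTok
deriving DecidableEq, Repr

def pvRend : PvTok → List Char
  | .op => [' ', '(']
  | .cl => [')', ' ']
  | .star => ['*']
  | .dig c => [c]
  | .val c => [' ', c, ' ']

def pvRendL (L : List PvTok) : List Char := L.flatMap pvRend

def pvToks (c : Char) : List PvTok :=
  if c = '*' then [.star]
  else if c = '(' then [.op]
  else if PySem.Chars.isdigit c then [.dig c]
  else if c = ')' then [.cl]
  else []

def pvWFt : PvTok → Bool
  | .dig c => PySem.Chars.isdigit c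
  | .val c => c = '0' || c = '1'
  | _ => true

def pvWF (L : List PvTok) : Prop := ∀ t ∈ L, pvWFt t = true

-- token-level effect of one  nueva.replace("(abc)", "v")
def pvRepl (a b c v : Char) : List PvTok → List PvTok
  | .op :: .dig x :: .dig y :: .dig z :: .cl :: R =>
    if x = a ∧ y = b ∧ z = c then .val v :: pvRepl a b c v R
    else .op :: .dig x :: .dig y :: .dig z :: .cl :: pvRepl a b c v R
  | t :: R => t :: pvRepl a b c v R
  | [] => []

-- token-level effect of B's single scan
def pvScanT : List PvTok → List PvTok
  | .op :: .dig x :: .dig y :: .dig z :: .cl :: R =>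
    if (x = '0' ∨ x = '1') ∧ (y = '0' ∨ y = '1') ∧ (z = '0' ∨ z = '1') then
      .val (if x = '0' ∧ y = '0' ∧ z = '0' then '0' else '1') :: pvScanT R
    else .op :: .dig x :: .dig y :: .dig z :: .cl :: pvScanT R
  | t :: R => t :: pvScanT R
  | [] => []

-- clean recursion equivalent to PySem.Chars.replace with nonempty pattern
def pvReplChars (o : Char) (old' new : List Char) : List Char → List Char
  | [] => []
  | c :: t =>
    if (o :: old').isPrefixOf (c :: t) then new ++ pvReplChars o old' new (t.drop old'.length)
    else c :: pvReplChars o old' new t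
termination_by l => l.length
decreasing_by
  · simp only [List.length_drop, List.length_cons]; omega
  · simp only [List.length_cons]; omega

-- group detector
def pvGrp? : List PvTok → Option (Char × Char × Char × List PvTok)
  | .op :: .dig x :: .dig y :: .dig z :: .cl :: R => some (x, y, z, R)
  | _ => none

lemma pvGrp?_some {L : List PvTok} {x y z R} (h : pvGrp? L = some (x, y, z, R)) :
    L = .op :: .dig x :: .dig y :: .dig z :: .cl :: R := by
  rw [pvGrp?.eq_def] at h
  split at h <;> simp_all

lemma pvGrp?_none {L : List PvTok} (h : pvGrp? L = none) :
    ∀ x y z R, L ≠ .op :: .dig x :: .dig y :: .dig z :: .cl :: R := by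
  intro x y z R hL
  rw [hL] at h
  simp [pvGrp?] at h

-- equation lemmas
lemma pvRepl_group (a b c v x y z : Char) (R : List PvTok) :
    pvRepl a b c v (.op :: .dig x :: .dig y :: .dig z :: .cl :: R) =
      if x = a ∧ y = b ∧ z = c then .val v :: pvRepl a b c v R
      else .op :: .dig x :: .dig y :: .dig z :: .cl :: pvRepl a b c v R := by
  rw [pvRepl.eq_def]

lemma pvRepl_val (a b c v w : Char) (R : List PvTok) :
    pvRepl a b c v (.val w :: R) = .val w :: pvRepl a b c v R := by
  rw [pvRepl.eq_def]

lemma pvRepl_cons_none (a b c v : Char) {t : PvTok} {R : List PvTok}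
    (h : pvGrp? (t :: R) = none) :
    pvRepl a b c v (t :: R) = t :: pvRepl a b c v R := by
  rw [pvRepl.eq_def]
  split
  · rename_i x y z R' heq
    exact absurd heq (pvGrp?_none h x y z R')
  · rename_i t' R' hnc heq
    injection heq with h1 h2
    rw [h1, h2]
  · rename_i heq
    simp at heq

lemma pvScanT_group (x y z : Char) (R : List PvTok) :
    pvScanT (.op :: .dig x :: .dig y :: .dig z :: .cl :: R) =
      if (x = '0' ∨ x = '1') ∧ (y = '0' ∨ y = '1') ∧ (z = '0' ∨ z = '1') then
        .val (if x = '0' ∧ y = '0' ∧ z = '0' then '0' else '1') :: pvScanT R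
      else .op :: .dig x :: .dig y :: .dig z :: .cl :: pvScanT R := by
  rw [pvScanT.eq_def]

lemma pvScanT_cons_none {t : PvTok} {R : List PvTok}
    (h : pvGrp? (t :: R) = none) :
    pvScanT (t :: R) = t :: pvScanT R := by
  rw [pvScanT.eq_def]
  split
  · rename_i x y z R' heq
    exact absurd heq (pvGrp?_none h x y z R')
  · rename_i t' R' hnc heq
    injection heq with h1 h2
    rw [h1, h2]
  · rename_i heq
    simp at heq

-- pvRepl never turns a non-group head into a group
lemma pvRepl_inv_dig {a b c v x : Char} {R Y : List PvTok}
    (h : pvRepl a b c v R = .dig x :: Y) :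
    ∃ R₁, R = .dig x :: R₁ ∧ Y = pvRepl a b c v R₁ := by
  rw [pvRepl.eq_def] at h
  split at h
  · split at h <;> simp_all
  · rename_i t R₁ _
    exact ⟨R₁, by simp_all, by simp_all⟩
  · simp_all

lemma pvRepl_inv_cl {a b c v : Char} {R Y : List PvTok}
    (h : pvRepl a b c v R = .cl :: Y) :
    ∃ R₁, R = .cl :: R₁ ∧ Y = pvRepl a b c v R₁ := by
  rw [pvRepl.eq_def] at h
  split at h
  · split at h <;> simp_all
  · rename_i t R₁ _
    exact ⟨R₁, by simp_all, by simp_all⟩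
  · simp_all

lemma pvGrp?_repl_none {a b c v : Char} {t : PvTok} {R : List PvTok}
    (h : pvGrp? (t :: R) = none) :
    pvGrp? (t :: pvRepl a b c v R) = none := by
  rcases hg : pvGrp? (t :: pvRepl a b c v R) with _ | ⟨x, y, z, R'⟩
  · rfl
  · exfalso
    have hL := pvGrp?_some hg
    have ht : t = PvTok.op := by injection hL
    have h1 : pvRepl a b c v R = .dig x :: .dig y :: .dig z :: .cl :: R' := by injection hL
    obtain ⟨R₁, rfl, hY⟩ := pvRepl_inv_dig h1
    obtain ⟨R₂, rfl, hY2⟩ := pvRepl_inv_dig hY.symm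
    obtain ⟨R₃, rfl, hY3⟩ := pvRepl_inv_dig hY2.symm
    obtain ⟨R₄, rfl, _⟩ := pvRepl_inv_cl hY3.symm
    exact pvGrp?_none h x y z R₄ (by rw [ht])

-- ========== composition of the eight replaces = the single token scan ==========
lemma pvComp_aux : ∀ n (L : List PvTok), L.length ≤ n →
    pvRepl '1' '1' '1' '1' (pvRepl '1' '1' '0' '1' (pvRepl '1' '0' '0' '1'
      (pvRepl '1' '0' '1' '1' (pvRepl '0' '1' '1' '1' (pvRepl '0' '1' '0' '1'
        (pvRepl '0' '0' '1' '1' (pvRepl '0' '0' '0' '0' L))))))) = pvScanT L := by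
  intro n
  induction n with
  | zero =>
    intro L hL
    have : L = [] := List.length_eq_zero_iff.mp (Nat.le_zero.mp hL)
    subst this; rfl
  | succ n ih =>
    intro L hL
    rcases hg : pvGrp? L with _ | ⟨⟨x, y, z, R⟩⟩
    · rcases L with _ | ⟨t, R⟩
      · rfl
      · have hrec := ih R (by simp at hL; omega)
        have h0 := hg
        have h1 := pvGrp?_repl_none (a := '0') (b := '0') (c := '0') (v := '0') h0
        have h2 := pvGrp?_repl_none (a := '0') (b := '0') (c := '1') (v := '1') h1
        have h3 := pvGrp?_repl_none (a := '0') (b := '1') (c := '0') (v := '1') h2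
        have h4 := pvGrp?_repl_none (a := '0') (b := '1') (c := '1') (v := '1') h3
        have h5 := pvGrp?_repl_none (a := '1') (b := '0') (c := '1') (v := '1') h4
        have h6 := pvGrp?_repl_none (a := '1') (b := '0') (c := '0') (v := '1') h5
        have h7 := pvGrp?_repl_none (a := '1') (b := '1') (c := '0') (v := '1') h6
        rw [pvRepl_cons_none _ _ _ _ h0, pvRepl_cons_none _ _ _ _ h1,
            pvRepl_cons_none _ _ _ _ h2, pvRepl_cons_none _ _ _ _ h3,
            pvRepl_cons_none _ _ _ _ h4, pvRepl_cons_none _ _ _ _ h5,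
            pvRepl_cons_none _ _ _ _ h6, pvRepl_cons_none _ _ _ _ h7,
            pvScanT_cons_none h0, hrec]
    · obtain rfl := pvGrp?_some hg
      have hrec := ih R (by simp at hL; omega)
      by_cases h01 : (x = '0' ∨ x = '1') ∧ (y = '0' ∨ y = '1') ∧ (z = '0' ∨ z = '1')
      · obtain ⟨hx, hy, hz⟩ := h01
        rcases hx with rfl | rfl <;> rcases hy with rfl | rfl <;> rcases hz with rfl | rfl <;>
          simp [pvRepl_group, pvScanT_group, pvRepl_val, hrec]
      · have hne : ∀ a b c : Char,
            (a = '0' ∨ a = '1') → (b = '0' ∨ b = '1') → (c = '0' ∨ c = '1') →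
            ¬(x = a ∧ y = b ∧ z = c) := by
          rintro a b c ha hb hc ⟨rfl, rfl, rfl⟩
          exact h01 ⟨ha, hb, hc⟩
        rw [pvRepl_group, if_neg (hne _ _ _ (by simp) (by simp) (by simp)),
            pvRepl_group, if_neg (hne _ _ _ (by simp) (by simp) (by simp)),
            pvRepl_group, if_neg (hne _ _ _ (by simp) (by simp) (by simp)),
            pvRepl_group, if_neg (hne _ _ _ (by simp) (by simp) (by simp)),
            pvRepl_group, if_neg (hne _ _ _ (by simp) (by simp) (by simp)),
            pvRepl_group, if_neg (hne _ _ _ (by simp) (by simp) (by simp)),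
            pvRepl_group, if_neg (hne _ _ _ (by simp) (by simp) (by simp)),
            pvRepl_group, if_neg (hne _ _ _ (by simp) (by simp) (by simp)),
            pvScanT_group, if_neg h01, hrec]

lemma pvComp (L : List PvTok) :
    pvRepl '1' '1' '1' '1' (pvRepl '1' '1' '0' '1' (pvRepl '1' '0' '0' '1'
      (pvRepl '1' '0' '1' '1' (pvRepl '0' '1' '1' '1' (pvRepl '0' '1' '0' '1'
        (pvRepl '0' '0' '1' '1' (pvRepl '0' '0' '0' '0' L))))))) = pvScanT L :=
  pvComp_aux L.length L le_rfl

-- ========== PySem.Chars.replace = pvReplChars ==========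
lemma pvGo_eq (o : Char) (old' new : List Char) :
    ∀ fuel (l acc : List Char), l.length ≤ fuel →
      PySem.Chars.replace.go (o :: old') new fuel l acc = acc.reverse ++ pvReplChars o old' new l := by
  intro fuel
  induction fuel with
  | zero =>
    intro l acc hl
    have : l = [] := List.length_eq_zero_iff.mp (Nat.le_zero.mp hl)
    subst this
    simp [PySem.Chars.replace.go, pvReplChars]
  | succ f ih =>
    intro l acc hl
    rcases l with _ | ⟨c, t⟩
    · simp [PySem.Chars.replace.go, pvReplChars]
    · rw [PySem.Chars.replace.go]
      by_cases hp : (o :: old').isPrefixOf (c :: t)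
      · rw [if_pos hp]
        rw [ih ((c :: t).drop (o :: old').length) (new.reverse ++ acc)
            (by simp at hl ⊢; omega)]
        rw [pvReplChars, if_pos hp]
        simp
      · rw [if_neg hp]
        rw [ih t (c :: acc) (by simp at hl; omega)]
        rw [pvReplChars, if_neg hp]
        simp

lemma pvReplace_eq (o : Char) (old' new s : List Char) :
    PySem.Chars.replace s (o :: old') new = pvReplChars o old' new s := by
  rw [PySem.Chars.replace]
  simp only [List.isEmpty_cons, Bool.false_eq_true, if_false]
  simpa using pvGo_eq o old' new s.length s [] le_rfl

-- ========== rendering analysis ==========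
lemma pvWF_tail {t : PvTok} {R : List PvTok} (h : pvWF (t :: R)) : pvWF R :=
  fun u hu => h u (List.mem_cons_of_mem _ hu)

lemma pvRend_digit {R : List PvTok} (hw : pvWF R) {x : Char} (hx : x = '0' ∨ x = '1')
    {rest : List Char} (h : pvRendL R = x :: rest) :
    ∃ R', R = .dig x :: R' ∧ rest = pvRendL R' := by
  rcases R with _ | ⟨t, R'⟩
  · simp [pvRendL] at h
  · cases t with
    | op => rcases hx with rfl | rfl <;> simp [pvRendL, pvRend] at h
    | cl => rcases hx with rfl | rfl <;> simp [pvRendL, pvRend] at h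
    | star => rcases hx with rfl | rfl <;> simp [pvRendL, pvRend] at h
    | val c => rcases hx with rfl | rfl <;> simp [pvRendL, pvRend] at h
    | dig c =>
      simp [pvRendL, pvRend] at h
      exact ⟨R', by rw [h.1], h.2.symm⟩

lemma pvRend_close {R : List PvTok} (hw : pvWF R)
    {rest : List Char} (h : pvRendL R = ')' :: rest) :
    ∃ R', R = .cl :: R' ∧ rest = ' ' :: pvRendL R' := by
  rcases R with _ | ⟨t, R'⟩
  · simp [pvRendL] at h
  · cases t with
    | op => simp [pvRendL, pvRend] at h
    | star => simp [pvRendL, pvRend] at h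
    | val c => simp [pvRendL, pvRend] at h
    | cl =>
      simp [pvRendL, pvRend] at h
      exact ⟨R', rfl, h.symm⟩
    | dig c =>
      exfalso
      simp [pvRendL, pvRend] at h
      have hd := hw (.dig c) (List.mem_cons_self ..)
      rw [h.1] at hd
      simp [pvWFt] at hd
      exact absurd hd (by decide)

lemma pvRend_group {R : List PvTok} (hw : pvWF R) {a b d : Char}
    (ha : a = '0' ∨ a = '1') (hb : b = '0' ∨ b = '1') (hd : d = '0' ∨ d = '1')
    {rest : List Char} (h : pvRendL R = a :: b :: d :: ')' :: rest) :
    ∃ R', R = .dig a :: .dig b :: .dig d :: .cl :: R' ∧ rest = ' ' :: pvRendL R' := by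
  obtain ⟨R1, rfl, h1⟩ := pvRend_digit hw ha h
  obtain ⟨R2, rfl, h2⟩ := pvRend_digit (pvWF_tail hw) hb h1.symm
  obtain ⟨R3, rfl, h3⟩ := pvRend_digit (pvWF_tail (pvWF_tail hw)) hd h2.symm
  obtain ⟨R4, rfl, h4⟩ := pvRend_close (pvWF_tail (pvWF_tail (pvWF_tail hw))) h3.symm
  exact ⟨R4, rfl, h4⟩

lemma pvIsdigit_ne_open {c : Char} (h : PySem.Chars.isdigit c = true) : c ≠ '(' := by
  rintro rfl; simp [PySem.Chars.isdigit] at h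

-- prefix facts for the pattern '(' a b c ')'
lemma pvPrefix_open {a b c : Char} {r : List Char} :
    ((['(', a, b, c, ')'] : List Char).isPrefixOf ('(' :: r) = true) ↔
      (([a, b, c, ')'] : List Char).isPrefixOf r = true) := by
  simp [List.isPrefixOf]

lemma pvPrefix_inner {a b c x y z : Char} {r : List Char} :
    ((['(', a, b, c, ')'] : List Char).isPrefixOf ('(' :: x :: y :: z :: ')' :: r) = true) ↔
      (a = x ∧ b = y ∧ c = z) := by
  simp [List.isPrefixOf]

-- pvReplChars copies a char that does not start the pattern
lemma pvReplChars_cons_ne (o : Char) (old' new : List Char) {c : Char} (h : c ≠ o)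
    (t : List Char) :
    pvReplChars o old' new (c :: t) = c :: pvReplChars o old' new t := by
  rw [pvReplChars]
  rw [if_neg (by simp [List.isPrefixOf]; intro hoc; exact absurd hoc.symm h)]

-- pvScan copies a char that is not '('
lemma pvScan_cons_ne {c : Char} (h : c ≠ '(') (t : List Char) :
    pvScan (c :: t) = c :: pvScan t := by
  rw [pvScan.eq_def]
  split
  · rename_i a b d e rest' heq
    exact absurd (by injection heq) h
  · rename_i c' rest' heq
    injection heq with h1 h2
    rw [h1, h2]
  · rename_i heq
    simp at heq

-- pvScan at '(' followed by a non-matching tail copies the '('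
lemma pvScan_open_nomatch {r : List Char}
    (h : ∀ a b d rest', r = a :: b :: d :: ')' :: rest' →
      ¬((a = '0' ∨ a = '1') ∧ (b = '0' ∨ b = '1') ∧ (d = '0' ∨ d = '1'))) :
    pvScan ('(' :: r) = '(' :: pvScan r := by
  rw [pvScan.eq_def]
  split
  · rename_i a b d e rest' heq
    have hr : r = a :: b :: d :: e :: rest' := by injection heq
    rw [if_neg (by
      rintro ⟨ha, hb, hd, rfl⟩
      exact h a b d rest' hr ⟨ha, hb, hd⟩)]
    rw [hr]
  · rename_i c' rest' heq
    injection heq with h1 h2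
    rw [h1, h2]
  · rename_i heq
    simp at heq

-- pvScan at a full '(xyz)' group
lemma pvScan_open_group (x y z : Char) (r : List Char) :
    pvScan ('(' :: x :: y :: z :: ')' :: r) =
      if (x = '0' ∨ x = '1') ∧ (y = '0' ∨ y = '1') ∧ (z = '0' ∨ z = '1') then
        (if x = '0' ∧ y = '0' ∧ z = '0' then '0' else '1') :: pvScan r
      else '(' :: pvScan (x :: y :: z :: ')' :: r) := by
  rw [pvScan.eq_def]
  simp

-- ========== the char passes track the token passes ==========
-- one .replace pass over a rendered well-formed token list = pvRepl
lemma pvReplPass_aux (a b c v : Char) (ha : a = '0' ∨ a = '1') (hb : b = '0' ∨ b = '1')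
    (hc : c = '0' ∨ c = '1') :
    ∀ n (L : List PvTok), L.length ≤ n → pvWF L →
      pvReplChars '(' [a, b, c, ')'] [v] (pvRendL L) = pvRendL (pvRepl a b c v L) := by
  intro n
  induction n with
  | zero =>
    intro L hL _
    have : L = [] := List.length_eq_zero_iff.mp (Nat.le_zero.mp hL)
    subst this
    simp [pvRendL, pvReplChars, pvRepl]
  | succ n ih =>
    intro L hL hw
    rcases hg : pvGrp? L with _ | ⟨⟨x, y, z, R⟩⟩
    · rcases L with _ | ⟨t, R⟩
      · simp [pvRendL, pvReplChars, pvRepl]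
      · have hrec := ih R (by simp at hL; omega) (pvWF_tail hw)
        rw [pvRepl_cons_none _ _ _ _ hg]
        cases t with
        | op =>
          have hnp : ¬ (([a, b, c, ')'] : List Char).isPrefixOf (pvRendL R) = true) := by
            intro hp
            obtain ⟨rest, hr⟩ := List.isPrefixOf_iff_prefix.mp hp
            obtain ⟨R', hR', _⟩ := pvRend_group (pvWF_tail hw) ha hb hc
              (by simpa using hr.symm)
            exact pvGrp?_none hg a b c R' (by rw [hR'])
          show pvReplChars '(' [a, b, c, ')'] [v] (' ' :: '(' :: pvRendL R) = _
          rw [pvReplChars_cons_ne _ _ _ (by decide) _]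
          rw [pvReplChars]
          rw [if_neg (fun hp => hnp (pvPrefix_open.mp hp))]
          rw [hrec]
          rfl
        | cl =>
          show pvReplChars '(' [a, b, c, ')'] [v] (')' :: ' ' :: pvRendL R) = _
          rw [pvReplChars_cons_ne _ _ _ (by decide) _,
              pvReplChars_cons_ne _ _ _ (by decide) _, hrec]
          rfl
        | star =>
          show pvReplChars '(' [a, b, c, ')'] [v] ('*' :: pvRendL R) = _
          rw [pvReplChars_cons_ne _ _ _ (by decide) _, hrec]
          rfl
        | dig d =>
          have hd : PySem.Chars.isdigit d = true := by
            have := hw (.dig d) (List.mem_cons_self ..); simpa [pvWFt] using this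
          show pvReplChars '(' [a, b, c, ')'] [v] (d :: pvRendL R) = _
          rw [pvReplChars_cons_ne _ _ _ (pvIsdigit_ne_open hd) _, hrec]
          rfl
        | val w =>
          have hww : w = '0' ∨ w = '1' := by
            have := hw (.val w) (List.mem_cons_self ..); simpa [pvWFt] using this
          have hw' : w ≠ '(' := by rcases hww with rfl | rfl <;> decide
          show pvReplChars '(' [a, b, c, ')'] [v] (' ' :: w :: ' ' :: pvRendL R) = _
          rw [pvReplChars_cons_ne _ _ _ (by decide) _,
              pvReplChars_cons_ne _ _ _ hw' _,
              pvReplChars_cons_ne _ _ _ (by decide) _, hrec]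
          rfl
    · obtain rfl := pvGrp?_some hg
      have hwR : pvWF R := pvWF_tail (pvWF_tail (pvWF_tail (pvWF_tail (pvWF_tail hw))))
      have hrec := ih R (by simp at hL; omega) hwR
      have hx : PySem.Chars.isdigit x = true := by
        have := hw (.dig x) (by simp); simpa [pvWFt] using this
      have hy : PySem.Chars.isdigit y = true := by
        have := hw (.dig y) (by simp); simpa [pvWFt] using this
      have hz : PySem.Chars.isdigit z = true := by
        have := hw (.dig z) (by simp); simpa [pvWFt] using this
      show pvReplChars '(' [a, b, c, ')'] [v]
          (' ' :: '(' :: x :: y :: z :: ')' :: ' ' :: pvRendL R) = _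
      rw [pvReplChars_cons_ne _ _ _ (by decide) _]
      by_cases hm : x = a ∧ y = b ∧ z = c
      · obtain ⟨rfl, rfl, rfl⟩ := hm
        rw [pvReplChars]
        rw [if_pos (pvPrefix_inner.mpr ⟨rfl, rfl, rfl⟩)]
        have hdrop : List.drop ([x, y, z, ')'] : List Char).length
            (x :: y :: z :: ')' :: ' ' :: pvRendL R) = ' ' :: pvRendL R := rfl
        rw [hdrop, pvReplChars_cons_ne _ _ _ (by decide) _, hrec]
        rw [pvRepl_group, if_pos ⟨rfl, rfl, rfl⟩]
        rfl
      · rw [pvReplChars]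
        rw [if_neg (fun hp => by
          obtain ⟨h1, h2, h3⟩ := pvPrefix_inner.mp hp
          exact hm ⟨h1.symm, h2.symm, h3.symm⟩)]
        rw [pvReplChars_cons_ne _ _ _ (pvIsdigit_ne_open hx) _,
            pvReplChars_cons_ne _ _ _ (pvIsdigit_ne_open hy) _,
            pvReplChars_cons_ne _ _ _ (pvIsdigit_ne_open hz) _,
            pvReplChars_cons_ne _ _ _ (by decide) _,
            pvReplChars_cons_ne _ _ _ (by decide) _, hrec]
        rw [pvRepl_group, if_neg hm]
        rfl

lemma pvReplPass (a b c v : Char) (ha : a = '0' ∨ a = '1') (hb : b = '0' ∨ b = '1')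
    (hc : c = '0' ∨ c = '1') (L : List PvTok) (hw : pvWF L) :
    PySem.Chars.replace (pvRendL L) ['(', a, b, c, ')'] [v] = pvRendL (pvRepl a b c v L) := by
  rw [pvReplace_eq]
  exact pvReplPass_aux a b c v ha hb hc L.length L le_rfl hw

-- pvRepl preserves well-formedness (v a 0/1 literal)
lemma pvWF_repl_aux (a b c v : Char) (hv : v = '0' ∨ v = '1') :
    ∀ n (L : List PvTok), L.length ≤ n → pvWF L → pvWF (pvRepl a b c v L) := by
  intro n
  induction n with
  | zero =>
    intro L hL _
    have : L = [] := List.length_eq_zero_iff.mp (Nat.le_zero.mp hL)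
    subst this; intro t ht; simp [pvRepl] at ht
  | succ n ih =>
    intro L hL hw
    rcases hg : pvGrp? L with _ | ⟨⟨x, y, z, R⟩⟩
    · rcases L with _ | ⟨t, R⟩
      · intro u hu; simp [pvRepl] at hu
      · rw [pvRepl_cons_none _ _ _ _ hg]
        intro u hu
        rcases List.mem_cons.mp hu with rfl | hu
        · exact hw u (List.mem_cons_self ..)
        · exact ih R (by simp at hL; omega) (pvWF_tail hw) u hu
    · obtain rfl := pvGrp?_some hg
      have hwR : pvWF R := pvWF_tail (pvWF_tail (pvWF_tail (pvWF_tail (pvWF_tail hw))))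
      have hrec := ih R (by simp at hL; omega) hwR
      rw [pvRepl_group]
      split_ifs with hm
      · intro u hu
        rcases List.mem_cons.mp hu with rfl | hu
        · simpa [pvWFt] using hv
        · exact hrec u hu
      · intro u hu
        simp only [List.mem_cons] at hu
        rcases hu with rfl | rfl | rfl | rfl | rfl | hu
        · exact hw _ (by simp)
        · exact hw _ (by simp)
        · exact hw _ (by simp)
        · exact hw _ (by simp)
        · exact hw _ (by simp)
        · exact hrec u hu

lemma pvWF_repl (a b c v : Char) (hv : v = '0' ∨ v = '1') (L : List PvTok) (hw : pvWF L) :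
    pvWF (pvRepl a b c v L) := pvWF_repl_aux a b c v hv L.length L le_rfl hw

-- B's char scan over a rendered well-formed token list = the token scan
lemma pvScanPass_aux :
    ∀ n (L : List PvTok), L.length ≤ n → pvWF L →
      pvScan (pvRendL L) = pvRendL (pvScanT L) := by
  intro n
  induction n with
  | zero =>
    intro L hL _
    have : L = [] := List.length_eq_zero_iff.mp (Nat.le_zero.mp hL)
    subst this
    simp [pvRendL, pvScan, pvScanT]
  | succ n ih =>
    intro L hL hw
    rcases hg : pvGrp? L with _ | ⟨⟨x, y, z, R⟩⟩
    · rcases L with _ | ⟨t, R⟩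
      · simp [pvRendL, pvScan, pvScanT]
      · have hrec := ih R (by simp at hL; omega) (pvWF_tail hw)
        rw [pvScanT_cons_none hg]
        cases t with
        | op =>
          have hnm : ∀ a b d rest', pvRendL R = a :: b :: d :: ')' :: rest' →
              ¬((a = '0' ∨ a = '1') ∧ (b = '0' ∨ b = '1') ∧ (d = '0' ∨ d = '1')) := by
            intro a b d rest' hr hcontra
            obtain ⟨ha, hb, hd⟩ := hcontra
            obtain ⟨R', hR', _⟩ := pvRend_group (pvWF_tail hw) ha hb hd hr
            exact pvGrp?_none hg a b d R' (by rw [hR'])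
          show pvScan (' ' :: '(' :: pvRendL R) = _
          rw [pvScan_cons_ne (by decide) _, pvScan_open_nomatch hnm, hrec]
          rfl
        | cl =>
          show pvScan (')' :: ' ' :: pvRendL R) = _
          rw [pvScan_cons_ne (by decide) _, pvScan_cons_ne (by decide) _, hrec]
          rfl
        | star =>
          show pvScan ('*' :: pvRendL R) = _
          rw [pvScan_cons_ne (by decide) _, hrec]
          rfl
        | dig d =>
          have hd : PySem.Chars.isdigit d = true := by
            have := hw (.dig d) (List.mem_cons_self ..); simpa [pvWFt] using this
          show pvScan (d :: pvRendL R) = _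
          rw [pvScan_cons_ne (pvIsdigit_ne_open hd) _, hrec]
          rfl
        | val w =>
          have hww : w = '0' ∨ w = '1' := by
            have := hw (.val w) (List.mem_cons_self ..); simpa [pvWFt] using this
          have hw' : w ≠ '(' := by rcases hww with rfl | rfl <;> decide
          show pvScan (' ' :: w :: ' ' :: pvRendL R) = _
          rw [pvScan_cons_ne (by decide) _, pvScan_cons_ne hw' _,
              pvScan_cons_ne (by decide) _, hrec]
          rfl
    · obtain rfl := pvGrp?_some hg
      have hwR : pvWF R := pvWF_tail (pvWF_tail (pvWF_tail (pvWF_tail (pvWF_tail hw))))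
      have hrec := ih R (by simp at hL; omega) hwR
      have hx : PySem.Chars.isdigit x = true := by
        have := hw (.dig x) (by simp); simpa [pvWFt] using this
      have hy : PySem.Chars.isdigit y = true := by
        have := hw (.dig y) (by simp); simpa [pvWFt] using this
      have hz : PySem.Chars.isdigit z = true := by
        have := hw (.dig z) (by simp); simpa [pvWFt] using this
      show pvScan (' ' :: '(' :: x :: y :: z :: ')' :: ' ' :: pvRendL R) = _
      rw [pvScan_cons_ne (by decide) _, pvScan_open_group]
      rw [pvScanT_group]
      by_cases h01 : (x = '0' ∨ x = '1') ∧ (y = '0' ∨ y = '1') ∧ (z = '0' ∨ z = '1')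
      · rw [if_pos h01, if_pos h01, pvScan_cons_ne (by decide) _, hrec]
        rfl
      · rw [if_neg h01, if_neg h01,
            pvScan_cons_ne (pvIsdigit_ne_open hx) _,
            pvScan_cons_ne (pvIsdigit_ne_open hy) _,
            pvScan_cons_ne (pvIsdigit_ne_open hz) _,
            pvScan_cons_ne (by decide) _,
            pvScan_cons_ne (by decide) _, hrec]
        rfl

lemma pvScanPass (L : List PvTok) (hw : pvWF L) :
    pvScan (pvRendL L) = pvRendL (pvScanT L) :=
  pvScanPass_aux L.length L le_rfl hw

-- ========== the cleaning passes ==========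
lemma pvFoldlA (l : List Char) : ∀ acc : List Char,
    l.foldl (fun nueva i =>
      let nueva := if i = '*' then nueva ++ [i] else nueva
      if i = '(' then nueva ++ [' ', '(']
      else if PySem.Chars.isdigit i then nueva ++ [i]
      else if i = ')' then nueva ++ [')', ' ']
      else nueva) acc = acc ++ pvRendL (l.flatMap pvToks) := by
  induction l with
  | nil => intro acc; simp [pvRendL]
  | cons c l ih =>
    intro acc
    rw [List.foldl_cons, ih]
    have hstep : (let nueva := if c = '*' then acc ++ [c] else acc
        if c = '(' then nueva ++ [' ', '(']
        else if PySem.Chars.isdigit c then nueva ++ [c]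
        else if c = ')' then nueva ++ [')', ' ']
        else nueva) = acc ++ pvRendL (pvToks c) := by
      by_cases h1 : c = '*'
      · subst h1
        have hd : PySem.Chars.isdigit '*' = false := by decide
        simp [hd, pvToks, pvRendL, pvRend]
      · by_cases h2 : c = '('
        · subst h2
          simp [pvToks, pvRendL, pvRend]
        · by_cases h3 : PySem.Chars.isdigit c
          · simp [h1, h2, h3, pvToks, pvRendL, pvRend]
          · by_cases h4 : c = ')'
            · subst h4
              have hd : PySem.Chars.isdigit ')' = false := by decide
              simp [hd, pvToks, pvRendL, pvRend]
            · simp [h1, h2, h3, h4, pvToks, pvRendL]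
    rw [hstep]
    simp [pvRendL, List.flatMap_cons]

lemma pvKeep_eq (c : Char) : pvKeep c = pvRendL (pvToks c) := by
  unfold pvKeep pvToks pvRendL
  by_cases h1 : c = '('
  · subst h1
    simp [pvRend]
  · by_cases h2 : c = ')'
    · subst h2
      have hd : PySem.Chars.isdigit ')' = false := by decide
      simp [hd, pvRend]
    · by_cases h3 : c = '*'
      · subst h3
        have hd : PySem.Chars.isdigit '*' = false := by decide
        simp [hd, pvRend]
      · by_cases h4 : PySem.Chars.isdigit c
        · simp [h1, h2, h3, h4, pvRend]
        · simp [h1, h2, h3, h4]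

lemma pvFlatMapKeep (l : List Char) :
    l.flatMap pvKeep = pvRendL (l.flatMap pvToks) := by
  induction l with
  | nil => rfl
  | cons c l ih =>
    rw [List.flatMap_cons, List.flatMap_cons, ih, pvKeep_eq]
    simp [pvRendL]

lemma pvWF_toks (l : List Char) : pvWF (l.flatMap pvToks) := by
  intro t ht
  obtain ⟨c, _, hc⟩ := List.mem_flatMap.mp ht
  unfold pvToks at hc
  split_ifs at hc with h1 h2 h3 h4 <;> simp at hc
  · rw [hc]; rfl
  · rw [hc]; rfl
  · rw [hc]; simpa [pvWFt] using h3
  · rw [hc]; rfl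

-- ===== VERDICT (by name: the statement is the Claim_ definition above) =====
theorem para_or_spec : Claim_equal_para_or := by
  unfold Claim_equal_para_or Spec_para_or
  intro cadena _
  simp only [para_or, para_or_alt]
  rw [pvFoldlA, pvFlatMapKeep]
  rw [List.nil_append]
  set T := cadena.toList.flatMap pvToks with hT
  have w0 : pvWF T := pvWF_toks _
  have w1 := pvWF_repl '0' '0' '0' '0' (by simp) _ w0
  have w2 := pvWF_repl '0' '0' '1' '1' (by simp) _ w1
  have w3 := pvWF_repl '0' '1' '0' '1' (by simp) _ w2
  have w4 := pvWF_repl '0' '1' '1' '1' (by simp) _ w3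
  have w5 := pvWF_repl '1' '0' '1' '1' (by simp) _ w4
  have w6 := pvWF_repl '1' '0' '0' '1' (by simp) _ w5
  have w7 := pvWF_repl '1' '1' '0' '1' (by simp) _ w6
  rw [pvReplPass '0' '0' '0' '0' (by simp) (by simp) (by simp) _ w0,
      pvReplPass '0' '0' '1' '1' (by simp) (by simp) (by simp) _ w1,
      pvReplPass '0' '1' '0' '1' (by simp) (by simp) (by simp) _ w2,
      pvReplPass '0' '1' '1' '1' (by simp) (by simp) (by simp) _ w3,
      pvReplPass '1' '0' '1' '1' (by simp) (by simp) (by simp) _ w4,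
      pvReplPass '1' '0' '0' '1' (by simp) (by simp) (by simp) _ w5,
      pvReplPass '1' '1' '0' '1' (by simp) (by simp) (by simp) _ w6,
      pvReplPass '1' '1' '1' '1' (by simp) (by simp) (by simp) _ w7,
      pvScanPass _ w0, pvComp]
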